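-- pv_equiv track=rewrite | github.com/mohsen-nyb/Trans-Fill | robust_fill.py | _split_flatten_examples
-- ===== SOURCE A (Python) =====
-- from typing import List, Tuple
--
-- def _split_flatten_examples(batch: List) -> Tuple[List, List]:
--     """
--     Flatten the examples so that they just separate data in the same batch.
--     They will be integrated again at the max-pool operator.
--
--     :param batch: List (batch_size) of tuples (input, output) of
--         lists (sequence_length) of token indices.
--     :returns: Tuple of two lists (batch_size * num_examples) of lists
--         (sequence_length) of token indices.
--     """
--     input_batch = [
--         input_sequence
--         for examples in batch
--         for input_sequence, _ in examples
--     ]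
--     output_batch = [
--         output_sequence
--         for examples in batch
--         for _, output_sequence in examples
--     ]
--     return input_batch, output_batch
-- ===== SOURCE B (Python) =====
-- from typing import List, Tuple
--
-- def _split_flatten_examples(batch: List) -> Tuple[List, List]:
--     flat = [pair for examples in batch for pair in examples]
--     if not flat:
--         return [], []
--     inputs, outputs = zip(*flat)
--     return list(inputs), list(outputs)
-- ===== Notes on version B (the rewrite author's own statement) =====
-- stated objective: idiomatic
-- what changed: B flattens the nested batch once into a single list of pairs and unzips it with zip(*flat), instead of A's two independent nested-comprehension scans each projecting one field.
import Mathlib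
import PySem

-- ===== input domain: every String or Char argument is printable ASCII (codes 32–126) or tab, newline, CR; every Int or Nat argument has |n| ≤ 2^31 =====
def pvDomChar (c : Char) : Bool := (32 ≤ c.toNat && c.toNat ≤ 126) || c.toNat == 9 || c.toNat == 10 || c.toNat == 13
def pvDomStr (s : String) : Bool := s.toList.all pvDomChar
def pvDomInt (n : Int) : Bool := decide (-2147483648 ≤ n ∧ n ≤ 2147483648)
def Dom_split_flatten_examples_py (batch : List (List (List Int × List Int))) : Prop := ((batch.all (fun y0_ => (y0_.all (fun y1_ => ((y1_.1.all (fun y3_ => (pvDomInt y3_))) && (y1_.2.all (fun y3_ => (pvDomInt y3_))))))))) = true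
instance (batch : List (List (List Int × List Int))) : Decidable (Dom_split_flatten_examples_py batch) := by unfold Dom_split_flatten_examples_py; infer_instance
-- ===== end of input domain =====

-- B flattens the batch once into a list of pairs and unzips it, instead of A's two nested-comprehension scans (idiomatic; same cost).


-- ===== PORT A =====
-- two nested comprehensions, each projecting one component
def split_flatten_examples_py (batch : List (List (List Int × List Int))) : List (List Int) × List (List Int) :=
  let input_batch := batch.flatMap (fun examples => examples.map (fun p => p.1))
  let output_batch := batch.flatMap (fun examples => examples.map (fun p => p.2))
  (input_batch, output_batch)

-- ===== PORT B =====
-- flatten once, then transpose (zip(*flat) = unzip); empty case guarded as in Source B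
def split_flatten_examples_py_alt (batch : List (List (List Int × List Int))) : List (List Int) × List (List Int) :=
  let flat := batch.flatMap (fun examples => examples)
  if flat = [] then ([], [])
  else flat.unzip

-- ===== PRECONDITION & SPEC =====
def Spec_split_flatten_examples_py (batch : List (List (List Int × List Int))) (out : List (List Int) × List (List Int)) : Prop := out = split_flatten_examples_py_alt batch
instance (batch : List (List (List Int × List Int))) (out : List (List Int) × List (List Int)) : Decidable (Spec_split_flatten_examples_py batch out) := by unfold Spec_split_flatten_examples_py; infer_instance

-- ===== CLAIM (what is proved, stated in full; the proofs are below) =====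
def Claim_equal_split_flatten_examples_py : Prop := ∀ (batch : List (List (List Int × List Int))), Dom_split_flatten_examples_py batch → Spec_split_flatten_examples_py batch (split_flatten_examples_py batch)

-- ===== LEMMAS AND PROOFS =====
theorem split_flatten_eq (batch : List (List (List Int × List Int))) :
    split_flatten_examples_py batch = split_flatten_examples_py_alt batch := by
  simp only [split_flatten_examples_py, split_flatten_examples_py_alt]
  split_ifs with h
  · simp only [List.flatMap_eq_nil_iff] at h
    refine Prod.ext ?_ ?_ <;> · simp only [List.flatMap_eq_nil_iff]; intro x hx; simp [h x hx]
  · rw [List.unzip_eq_map]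
    refine Prod.ext ?_ ?_ <;> simp [List.flatMap_def]

-- ===== VERDICT (by name: the statement is the Claim_ definition above) =====
theorem split_flatten_examples_py_spec : Claim_equal_split_flatten_examples_py := by
  intro batch _
  exact split_flatten_eq batch
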